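-- pv_equiv track=rewrite | github.com/stvsever/research_paper_on_cognitive_sovereignity | src/backend/utils/publication_assets.py | _latex_escape_text
-- ===== SOURCE A (Python) =====
-- def _latex_escape_text(value: str) -> str:
--     escaped = str(value)
--     for old, new in {
--         "\\": r"\textbackslash{}",
--         "_": r"\_",
--         "%": r"\%",
--         "&": r"\&",
--         "#": r"\#",
--     }.items():
--         escaped = escaped.replace(old, new)
--     return escaped
-- ===== SOURCE B (Python) =====
-- _ESCAPES = {
--     "\\": r"\textbackslash{}",
--     "_": r"\_",
--     "%": r"\%",
--     "&": r"\&",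
--     "#": r"\#",
-- }
--
--
-- def _latex_escape_text(value: str) -> str:
--     return "".join(_ESCAPES.get(ch, ch) for ch in str(value))
-- ===== Notes on version B (the rewrite author's own statement) =====
-- stated objective: idiomatic
-- what changed: Replaces five sequential full-string .replace() passes with a single character-by-character scan over str(value) that joins table.get(ch, ch) for each character.
import Mathlib
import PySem

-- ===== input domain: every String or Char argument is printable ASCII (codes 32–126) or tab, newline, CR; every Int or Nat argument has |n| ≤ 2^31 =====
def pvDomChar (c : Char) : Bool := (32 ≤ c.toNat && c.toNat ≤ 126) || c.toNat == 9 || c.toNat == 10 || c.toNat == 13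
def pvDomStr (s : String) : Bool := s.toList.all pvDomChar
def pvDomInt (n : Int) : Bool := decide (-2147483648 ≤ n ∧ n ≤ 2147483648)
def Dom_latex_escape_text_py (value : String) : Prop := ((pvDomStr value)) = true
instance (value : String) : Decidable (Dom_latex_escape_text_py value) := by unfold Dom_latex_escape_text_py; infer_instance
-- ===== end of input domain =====

-- B replaces A's five sequential full-string replace passes with one character scan
-- over a lookup table (objective: idiomatic single pass); same return value everywhere.

-- ===== PORT A =====
-- A loops over the items of a literal dict, applying str.replace for each pair.
def latex_escape_text_py (value : String) : String :=
  [("\\", "\\textbackslash{}"), ("_", "\\_"), ("%", "\\%"), ("&", "\\&"), ("#", "\\#")].foldl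
    (fun escaped p => PySem.Str.replace escaped p.1 p.2) value

-- ===== PORT B =====
-- B's escape table and its single pass: ''.join(table.get(ch, ch) for ch in value).
def pvEscTable : PySem.Dict Char String :=
  PySem.Dict.mk [('\\', "\\textbackslash{}"), ('_', "\\_"), ('%', "\\%"), ('&', "\\&"), ('#', "\\#")]

def latex_escape_text_py_alt (value : String) : String :=
  PySem.Str.join "" (value.toList.map (fun ch => pvEscTable.getD ch (String.ofList [ch])))

-- ===== PRECONDITION & SPEC =====
def Spec_latex_escape_text_py (value : String) (out : String) : Prop := out = latex_escape_text_py_alt value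
instance (value : String) (out : String) : Decidable (Spec_latex_escape_text_py value out) := by unfold Spec_latex_escape_text_py; infer_instance

-- ===== CLAIM (what is proved, stated in full; the proofs are below) =====
def Claim_equal_latex_escape_text_py : Prop := ∀ (value : String), Dom_latex_escape_text_py value → Spec_latex_escape_text_py value (latex_escape_text_py value)

-- ===== LEMMAS AND PROOFS =====

-- replace.go with a single-character pattern is a flatMap (given enough fuel).
theorem pv_go_single (o : Char) (new : List Char) :
    ∀ (fuel : Nat) (l acc : List Char), l.length ≤ fuel →
      PySem.Chars.replace.go [o] new fuel l acc
        = acc.reverse ++ l.flatMap (fun c => if c == o then new else [c]) := by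
  intro fuel
  induction fuel with
  | zero =>
    intro l acc h
    have : l = [] := List.eq_nil_of_length_eq_zero (Nat.le_zero.mp h)
    subst this
    simp [PySem.Chars.replace.go]
  | succ n ih =>
    intro l acc h
    cases l with
    | nil => simp [PySem.Chars.replace.go]
    | cons c t =>
      simp only [PySem.Chars.replace.go]
      by_cases hc : c = o
      · subst hc
        have hpre : List.isPrefixOf [c] (c :: t) = true := by
          simp [List.isPrefixOf]
        rw [if_pos hpre]
        have hd : List.drop [c].length (c :: t) = t := rfl
        rw [hd, ih t (new.reverse ++ acc) (by simpa using Nat.le_of_succ_le_succ h)]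
        simp
      · have hpre : List.isPrefixOf [o] (c :: t) = false := by
          simp [List.isPrefixOf]
          exact fun h' => hc h'.symm
        rw [if_neg (by simp [hpre])]
        rw [ih t (c :: acc) (by simpa using Nat.le_of_succ_le_succ h)]
        simp [hc]

theorem pv_replace_single (s : List Char) (o : Char) (new : List Char) :
    PySem.Chars.replace s [o] new = s.flatMap (fun c => if c == o then new else [c]) := by
  rw [PySem.Chars.replace]
  simp only [List.isEmpty, if_neg (by simp : ¬ (false = true))]
  simpa using pv_go_single o new s.length s []

theorem pv_flatMap_flatMap {α β γ : Type} (l : List α) (f : α → List β) (g : β → List γ) :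
    (l.flatMap f).flatMap g = l.flatMap (fun x => (f x).flatMap g) := by
  induction l with
  | nil => rfl
  | cons a t ih => simp [List.flatMap_cons, List.flatMap_append, ih]

theorem pv_join_nil_flatten (parts : List (List Char)) :
    PySem.Chars.join [] parts = parts.flatten := by
  unfold PySem.Chars.join
  induction parts with
  | nil => rfl
  | cons a t ih =>
    cases t with
    | nil => simp [List.intercalate]
    | cons b r =>
      rw [← PySem.Chars.join] at *
      rw [PySem.Chars.join_cons_cons, ih]
      simp

-- the per-character escape B computes
theorem pv_escB (c : Char) :
    (pvEscTable.getD c (String.ofList [c])).toList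
      = if c = '\\' then "\\textbackslash{}".toList
        else if c = '_' then "\\_".toList
        else if c = '%' then "\\%".toList
        else if c = '&' then "\\&".toList
        else if c = '#' then "\\#".toList
        else [c] := by
  rw [PySem.Dict.getD_eq_get?_getD]
  unfold pvEscTable
  simp only [PySem.Dict.get?_mk_cons, beq_iff_eq]
  by_cases h1 : '\\' = c
  · subst h1; simp
  by_cases h2 : '_' = c
  · subst h2; simp [h1]
  by_cases h3 : '%' = c
  · subst h3; simp [h1, h2]
  by_cases h4 : '&' = c
  · subst h4; simp [h1, h2, h3]
  by_cases h5 : '#' = c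
  · subst h5; simp [h1, h2, h3, h4]
  · have : (PySem.Dict.mk ([] : List (Char × String))).get? c = none := by rfl
    simp [h1, h2, h3, h4, h5, Ne.symm h1, Ne.symm h2, Ne.symm h3, Ne.symm h4, Ne.symm h5, this]

-- A's chained per-character escapes collapse to B's single table lookup.
theorem pv_chain_char (c : Char) :
    ((((if c == '\\' then "\\textbackslash{}".toList else [c]).flatMap
        (fun c => if c == '_' then "\\_".toList else [c])).flatMap
        (fun c => if c == '%' then "\\%".toList else [c])).flatMap
        (fun c => if c == '&' then "\\&".toList else [c])).flatMap
        (fun c => if c == '#' then "\\#".toList else [c])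
      = (pvEscTable.getD c (String.ofList [c])).toList := by
  rw [pv_escB]
  by_cases h1 : c = '\\'
  · subst h1; decide
  by_cases h2 : c = '_'
  · subst h2; decide
  by_cases h3 : c = '%'
  · subst h3; decide
  by_cases h4 : c = '&'
  · subst h4; decide
  by_cases h5 : c = '#'
  · subst h5; decide
  · simp [h1, h2, h3, h4, h5]

-- ===== VERDICT (by name: the statement is the Claim_ definition above) =====
theorem latex_escape_text_py_spec : Claim_equal_latex_escape_text_py := by
  intro value _
  unfold Spec_latex_escape_text_py latex_escape_text_py latex_escape_text_py_alt
  rw [← String.toList_inj]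
  simp only [List.foldl_cons, List.foldl_nil, PySem.Str.toList_replace, PySem.Str.toList_join,
    List.map_map]
  have e1 : ("\\" : String).toList = ['\\'] := by decide
  have e2 : ("_" : String).toList = ['_'] := by decide
  have e3 : ("%" : String).toList = ['%'] := by decide
  have e4 : ("&" : String).toList = ['&'] := by decide
  have e5 : ("#" : String).toList = ['#'] := by decide
  rw [e1, e2, e3, e4, e5]
  rw [pv_replace_single, pv_replace_single, pv_replace_single, pv_replace_single,
    pv_replace_single]
  rw [pv_flatMap_flatMap, pv_flatMap_flatMap, pv_flatMap_flatMap, pv_flatMap_flatMap]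
  have hj : ("" : String).toList = [] := rfl
  rw [hj, pv_join_nil_flatten, List.flatten_eq_flatMap]
  simp only [List.flatMap_map, Function.comp_apply, id_eq]
  apply List.flatMap_congr
  intro c _
  rw [← pv_flatMap_flatMap, ← pv_flatMap_flatMap, ← pv_flatMap_flatMap]
  exact pv_chain_char c
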